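-- pv_equiv track=rewrite | github.com/volcengine/verl | atropos/environments/intern_bootcamp/internbootcamp_lib/internbootcamp/bootcamp/cpermutationgame/cpermutationgame.py | compute_s_optimized
-- ===== SOURCE A (Python) =====
-- def compute_s_optimized(n, arr):
--     pos_map = {num: idx for idx, num in enumerate(arr)}
--     moves = [[] for _ in range(n)]
--
--     # 预处理合法移动（优化版本）
--     for i in range(n):
--         ai = arr[i]
--         # 向左遍历（步长ai）
--         for j in range(i - ai, -1, -ai):
--             if arr[j] > ai:
--                 moves[i].append(j)
--         # 向右遍历（步长ai）
--         for j in range(i + ai, n, ai):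
--             if arr[j] > ai:
--                 moves[i].append(j)
--
--     # 动态规划从后往前处理
--     dp = ['B'] * n
--     sorted_indices = sorted(range(n), key=lambda x: -arr[x])
--
--     for idx in sorted_indices:
--         for move in moves[idx]:
--             if dp[move] == 'B':
--                 dp[idx] = 'A'
--                 break
--     return ''.join(dp)
-- ===== SOURCE B (Python) =====
-- def compute_s_optimized(n, arr):
--     # Top-down memoized game search: no sorting, no moves precompute; win(i) is
--     # True iff some stride-reachable j with arr[j] > arr[i] is losing.
--     memo = {}
--
--     def win(i):
--         if i in memo:
--             return memo[i]
--         ai = arr[i]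
--         res = False
--         for j in list(range(i - ai, -1, -ai)) + list(range(i + ai, n, ai)):
--             if arr[j] > ai and not win(j):
--                 res = True
--                 break
--         memo[i] = res
--         return res
--
--     return ''.join('A' if win(i) else 'B' for i in range(n))
-- ===== Notes on version B (the rewrite author's own statement) =====
-- stated objective: alternative
-- what changed: B replaces A's bottom-up DP (sort indices by decreasing value, precompute per-position move lists, fill dp in that order) with a top-down memoized recursive game search win(i) that scans stride-reachable larger-value positions on demand; no sorting, no move-list materialisation.
import Mathlib
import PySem

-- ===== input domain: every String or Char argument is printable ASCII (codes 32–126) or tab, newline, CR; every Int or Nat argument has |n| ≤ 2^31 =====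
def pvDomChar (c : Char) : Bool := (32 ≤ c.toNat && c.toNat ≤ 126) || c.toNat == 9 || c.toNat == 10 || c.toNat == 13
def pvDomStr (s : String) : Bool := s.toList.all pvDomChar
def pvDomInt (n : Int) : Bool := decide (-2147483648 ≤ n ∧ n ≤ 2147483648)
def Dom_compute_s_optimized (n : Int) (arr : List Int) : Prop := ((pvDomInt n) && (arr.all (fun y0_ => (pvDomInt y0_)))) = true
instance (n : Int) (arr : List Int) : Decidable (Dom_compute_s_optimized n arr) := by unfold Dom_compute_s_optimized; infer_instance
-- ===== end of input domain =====

-- B replaces A's bottom-up DP (sort by decreasing value + moves precompute) by a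
-- top-down memoized recursive game search; same return value, similar cost.

-- ===== PORT A =====
def compute_s_optimized (n : Int) (arr : List Int) : String :=
  let _pos_map : PySem.Dict Int Int :=
    (PySem.List.enumerate arr 0).foldl (fun d p => PySem.Dict.insert d p.2 p.1) PySem.Dict.empty
  let moves : List (List Int) :=
    (PySem.List.pyRange 0 n 1).foldl (fun mv i =>
      let ai := PySem.List.pyGetD arr i 0
      let mv := (PySem.List.pyRange (i - ai) (-1) (-ai)).foldl (fun mv j =>
          if PySem.List.pyGetD arr j 0 > ai
          then PySem.List.pySetD mv i (PySem.List.pyGetD mv i [] ++ [j]) else mv) mv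
      let mv := (PySem.List.pyRange (i + ai) n ai).foldl (fun mv j =>
          if PySem.List.pyGetD arr j 0 > ai
          then PySem.List.pySetD mv i (PySem.List.pyGetD mv i [] ++ [j]) else mv) mv
      mv) (List.replicate n.toNat [])
  let dp0 : List Char := List.replicate n.toNat 'B'
  let sorted_indices :=
    PySem.List.sorted (PySem.List.pyRange 0 n 1) (fun x => -(PySem.List.pyGetD arr x 0)) false
  let dp := sorted_indices.foldl (fun dp idx =>
      match (PySem.List.pyGetD moves idx []).find? (fun m => PySem.List.pyGetD dp m 'B' == 'B') with
      | some _ => PySem.List.pySetD dp idx 'A'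
      | none => dp) dp0
  String.ofList dp

-- ===== PORT B =====
-- candidate list of Source B's for-loop: list(range(i-ai,-1,-ai)) + list(range(i+ai,n,ai))
def pvCands (n : Int) (arr : List Int) (i : Int) : List Int :=
  let ai := PySem.List.pyGetD arr i 0
  PySem.List.pyRange (i - ai) (-1) (-ai) ++ PySem.List.pyRange (i + ai) n ai

mutual
  -- win(i) with memo dict threaded through; fuel only makes the recursion total
  def pvWinGo (n : Int) (arr : List Int) :
      Nat → Int → PySem.Dict Int Bool → Bool × PySem.Dict Int Bool
    | fuel, i, memo =>
      match PySem.Dict.get? memo i with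
      | some b => (b, memo)
      | none =>
        match fuel with
        | 0 => (false, memo)
        | f + 1 =>
          let r := pvWinList n arr f (PySem.List.pyGetD arr i 0) (pvCands n arr i) memo
          (r.1, PySem.Dict.insert r.2 i r.1)
  termination_by fuel i memo => (fuel, 0)

  -- the 'for j in candidates: if arr[j] > ai and not win(j): res = True; break' loop
  def pvWinList (n : Int) (arr : List Int) :
      Nat → Int → List Int → PySem.Dict Int Bool → Bool × PySem.Dict Int Bool
    | _, _, [], memo => (false, memo)
    | f, ai, j :: rest, memo =>
      if PySem.List.pyGetD arr j 0 > ai then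
        let p := pvWinGo n arr f j memo
        if p.1 then pvWinList n arr f ai rest p.2 else (true, p.2)
      else pvWinList n arr f ai rest memo
  termination_by f ai l memo => (f, l.length + 1)
end

def compute_s_optimized_alt (n : Int) (arr : List Int) : String :=
  let r := (PySem.List.pyRange 0 n 1).foldl
    (fun acc i =>
      let p := pvWinGo n arr n.toNat i acc.2
      (acc.1 ++ [if p.1 then 'A' else 'B'], p.2))
    (([] : List Char), (PySem.Dict.empty : PySem.Dict Int Bool))
  String.ofList r.1

-- ===== PRECONDITION & SPEC =====
-- Pre_ excludes exactly the inputs where the Python A raises: n > len(arr) (IndexError on arr[i])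
-- and a zero among the first n entries (range(..., step 0) raises ValueError).
def Pre_compute_s_optimized (n : Int) (arr : List Int) : Prop :=
  n ≤ (arr.length : Int) ∧ ∀ x ∈ arr.take n.toNat, x ≠ 0
instance (n : Int) (arr : List Int) : Decidable (Pre_compute_s_optimized n arr) := by
  unfold Pre_compute_s_optimized; infer_instance
def pvWitness_compute_s_optimized : Int × List Int := (3, [2, 1, 3])

def Spec_compute_s_optimized (n : Int) (arr : List Int) (out : String) : Prop := out = compute_s_optimized_alt n arr
instance (n : Int) (arr : List Int) (out : String) : Decidable (Spec_compute_s_optimized n arr out) := by unfold Spec_compute_s_optimized; infer_instance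

-- ===== CLAIM (what is proved, stated in full; the proofs are below) =====
def Claim_equal_compute_s_optimized : Prop := ∀ (n : Int) (arr : List Int), Dom_compute_s_optimized n arr → Pre_compute_s_optimized n arr → Spec_compute_s_optimized n arr (compute_s_optimized n arr)

-- ===== LEMMAS AND PROOFS =====

-- value comparison used by both programs, as a Bool predicate
def pvGt (arr : List Int) (ai j : Int) : Bool := decide (PySem.List.pyGetD arr j 0 > ai)

-- the filtered candidate list: exactly the moves A precomputes for position i
def pvF (n : Int) (arr : List Int) (i : Int) : List Int :=
  (pvCands n arr i).filter (pvGt arr (PySem.List.pyGetD arr i 0))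

-- number of positions holding a strictly larger value: the game's termination measure
def pvRank (n : Int) (arr : List Int) (i : Int) : Nat :=
  ((PySem.List.pyRange 0 n 1).filter
    (fun k => decide (PySem.List.pyGetD arr k 0 > PySem.List.pyGetD arr i 0))).length

lemma pvRank_lt (n : Int) (arr : List Int) (i j : Int) (h0 : 0 ≤ j) (hn : j < n)
    (hgt : PySem.List.pyGetD arr i 0 < PySem.List.pyGetD arr j 0) :
    pvRank n arr j < pvRank n arr i := by
  unfold pvRank
  have hsub : (PySem.List.pyRange 0 n 1).filter
      (fun k => decide (PySem.List.pyGetD arr k 0 > PySem.List.pyGetD arr j 0)) =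
      ((PySem.List.pyRange 0 n 1).filter
        (fun k => decide (PySem.List.pyGetD arr k 0 > PySem.List.pyGetD arr i 0))).filter
        (fun k => decide (PySem.List.pyGetD arr k 0 > PySem.List.pyGetD arr j 0)) := by
    rw [List.filter_filter]
    apply List.filter_congr
    intro a _
    by_cases h : PySem.List.pyGetD arr a 0 > PySem.List.pyGetD arr j 0
    · simp only [decide_eq_true h]
      have : PySem.List.pyGetD arr a 0 > PySem.List.pyGetD arr i 0 := by omega
      simp [this]
    · simp [h]
  rw [hsub, List.length_filter_lt_length_iff_exists]
  refine ⟨j, List.mem_filter.2 ⟨?_, by simp; omega⟩, by simp⟩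
  rw [PySem.List.mem_pyRange_one]; omega

-- moves with in-range targets; bounds are part of the predicate so the recursion is total
def pvGoodB (n : Int) (arr : List Int) (ai j : Int) : Bool :=
  decide (0 ≤ j) && decide (j < n) && decide (PySem.List.pyGetD arr j 0 > ai)

-- reference value of the game: position i is winning
def pvWinSpec (n : Int) (arr : List Int) (i : Int) : Bool :=
  (((pvCands n arr i).filter (pvGoodB n arr (PySem.List.pyGetD arr i 0))).attach).any
    (fun j => !pvWinSpec n arr j.val)
termination_by pvRank n arr i
decreasing_by
  have hm := List.mem_filter.1 j.property
  have hg := hm.2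
  simp only [pvGoodB, Bool.and_eq_true, decide_eq_true_eq] at hg
  exact pvRank_lt n arr i j.val hg.1.1 hg.1.2 hg.2

lemma pvCands_bounds (n : Int) (arr : List Int) (i : Int) (h0 : 0 ≤ i) (hn : i < n) :
    ∀ j ∈ pvCands n arr i, 0 ≤ j ∧ j < n := by
  intro j hj
  unfold pvCands at hj
  rcases List.mem_append.1 hj with h | h
  · rcases lt_trichotomy (PySem.List.pyGetD arr i 0) 0 with hlt | heq | hgt
    · have := (PySem.List.mem_pyRange_iff_of_pos (by omega) j).1 h
      omega
    · rw [heq] at h; simp [PySem.List.pyRange] at h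
    · have := (PySem.List.mem_pyRange_iff_of_neg (by omega) j).1 h
      omega
  · rcases lt_trichotomy (PySem.List.pyGetD arr i 0) 0 with hlt | heq | hgt
    · have := (PySem.List.mem_pyRange_iff_of_neg (by omega) j).1 h
      omega
    · rw [heq] at h; simp [PySem.List.pyRange] at h
    · have := (PySem.List.mem_pyRange_iff_of_pos (by omega) j).1 h
      omega

lemma pvFilter_eq (n : Int) (arr : List Int) (i : Int) (h0 : 0 ≤ i) (hn : i < n) :
    (pvCands n arr i).filter (pvGoodB n arr (PySem.List.pyGetD arr i 0)) = pvF n arr i := by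
  unfold pvF
  apply List.filter_congr
  intro j hj
  have hb := pvCands_bounds n arr i h0 hn j hj
  simp [pvGoodB, pvGt, hb.1, hb.2]

lemma pvWinSpec_eq (n : Int) (arr : List Int) (i : Int) (h0 : 0 ≤ i) (hn : i < n) :
    pvWinSpec n arr i = (pvF n arr i).any (fun j => !pvWinSpec n arr j) := by
  rw [pvWinSpec, ← pvFilter_eq n arr i h0 hn]
  simp only [List.any_subtype, List.unattach_attach]

-- ---------- A-side: the precomputed moves list ----------

-- the body of A's outer precompute loop (identical to the lambda in the port)
def pvStepA (n : Int) (arr : List Int) (mv : List (List Int)) (i : Int) : List (List Int) :=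
  let ai := PySem.List.pyGetD arr i 0
  let mv := (PySem.List.pyRange (i - ai) (-1) (-ai)).foldl (fun mv j =>
      if PySem.List.pyGetD arr j 0 > ai
      then PySem.List.pySetD mv i (PySem.List.pyGetD mv i [] ++ [j]) else mv) mv
  let mv := (PySem.List.pyRange (i + ai) n ai).foldl (fun mv j =>
      if PySem.List.pyGetD arr j 0 > ai
      then PySem.List.pySetD mv i (PySem.List.pyGetD mv i [] ++ [j]) else mv) mv
  mv

lemma pvGetDSet {α : Type} (mv : List α) (k : Nat) (v d : α) (h : k < mv.length) :
    (mv.set k v).getD k d = v := by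
  simp [List.getD_eq_getElem?_getD, h]

lemma pvGetDSetNe {α : Type} (mv : List α) (k k' : Nat) (v d : α) (h : k ≠ k') :
    (mv.set k v).getD k' d = mv.getD k' d := by
  simp [List.getD_eq_getElem?_getD, h]

-- one of A's inner append loops over a range = set position k to its old list ++ the filtered range
lemma pvInner (arr : List Int) (b : Int) (l : List Int) :
    ∀ (mv : List (List Int)) (k : Nat), k < mv.length →
    l.foldl (fun mv j => if PySem.List.pyGetD arr j 0 > b
        then mv.set k (mv.getD k [] ++ [j]) else mv) mv
      = mv.set k (mv.getD k [] ++ l.filter (fun j => decide (PySem.List.pyGetD arr j 0 > b))) := by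
  induction l with
  | nil =>
    intro mv k hk
    simp only [List.foldl_nil, List.filter_nil, List.append_nil]
    rw [List.getD_eq_getElem mv [] hk, List.set_getElem_self]
  | cons a t ih =>
    intro mv k hk
    simp only [List.foldl_cons, List.filter_cons, decide_eq_true_eq]
    by_cases hP : PySem.List.pyGetD arr a 0 > b
    · rw [if_pos hP, if_pos hP, ih _ k (by simpa using hk),
        pvGetDSet _ _ _ _ hk, List.set_set]
      simp [List.append_assoc]
    · rw [if_neg hP, if_neg hP, ih mv k hk]

-- the body of A's precompute loop sets exactly position i (to its old content ++ the filtered scan)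
lemma pvStepA_eq (n : Int) (arr : List Int) (mv : List (List Int)) (i : Int)
    (hi0 : 0 ≤ i) (hil : i.toNat < mv.length) :
    pvStepA n arr mv i = mv.set i.toNat (mv.getD i.toNat [] ++ pvF n arr i) := by
  have hic : ((i.toNat : Nat) : Int) = i := Int.toNat_of_nonneg hi0
  unfold pvStepA pvF pvCands pvGt
  rw [← hic]
  simp only [Int.toNat_natCast, PySem.List.pySetD_natCast, PySem.List.pyGetD_natCast]
  rw [pvInner arr _ _ mv i.toNat hil,
    pvInner arr _ _ _ i.toNat (by simpa using hil),
    pvGetDSet _ _ _ _ hil, List.set_set, List.append_assoc, ← List.filter_append]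

-- A's outer precompute loop, characterised pointwise: distinct in-range indices, each set once
lemma pvOuter (F : Int → List Int) (step : List (List Int) → Int → List (List Int)) :
    ∀ (l : List Int) (mv : List (List Int)),
    (∀ (mv' : List (List Int)) (i : Int), i ∈ l → 0 ≤ i → i.toNat < mv'.length →
        step mv' i = mv'.set i.toNat (mv'.getD i.toNat [] ++ F i)) →
    l.Nodup → (∀ j ∈ l, 0 ≤ j ∧ j.toNat < mv.length) →
    ∀ i : Int, 0 ≤ i →
      (l.foldl step mv).getD i.toNat [] =
        if i ∈ l then mv.getD i.toNat [] ++ F i else mv.getD i.toNat [] := by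
  intro l
  induction l with
  | nil => intro mv _ _ _ i _; simp
  | cons a t ih =>
    intro mv hstep hnd hb i hi
    obtain ⟨ha0, halen⟩ := hb a (by simp)
    have hstep_a := hstep mv a (by simp) ha0 halen
    have hlen' : (step mv a).length = mv.length := by rw [hstep_a]; simp
    have hrec := ih (step mv a)
      (fun mv' i hmem h0 hl => hstep mv' i (by simp [hmem]) h0 hl)
      hnd.of_cons
      (fun j hj => ⟨(hb j (by simp [hj])).1, by rw [hlen']; exact (hb j (by simp [hj])).2⟩)
      i hi
    rw [List.foldl_cons, hrec]
    by_cases hia : i = a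
    · subst hia
      have hnot : i ∉ t := (List.nodup_cons.1 hnd).1
      rw [if_neg hnot, if_pos (by simp), hstep_a, pvGetDSet _ _ _ _ halen]
    · have hne : i.toNat ≠ a.toNat := by omega
      have hget : (step mv a).getD i.toNat [] = mv.getD i.toNat [] := by
        rw [hstep_a, pvGetDSetNe _ _ _ _ _ (Ne.symm hne)]
      by_cases hit : i ∈ t
      · rw [if_pos hit, if_pos (by simp [hit]), hget]
      · rw [if_neg hit, if_neg (by simp [hia, hit]), hget]

-- what A's moves list holds at an in-range index
lemma pvMoves (n : Int) (arr : List Int) (idx : Int) (h0 : 0 ≤ idx) (hn : idx < n) :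
    PySem.List.pyGetD ((PySem.List.pyRange 0 n 1).foldl (fun mv i =>
      let ai := PySem.List.pyGetD arr i 0
      let mv := (PySem.List.pyRange (i - ai) (-1) (-ai)).foldl (fun mv j =>
          if PySem.List.pyGetD arr j 0 > ai
          then PySem.List.pySetD mv i (PySem.List.pyGetD mv i [] ++ [j]) else mv) mv
      let mv := (PySem.List.pyRange (i + ai) n ai).foldl (fun mv j =>
          if PySem.List.pyGetD arr j 0 > ai
          then PySem.List.pySetD mv i (PySem.List.pyGetD mv i [] ++ [j]) else mv) mv
      mv) (List.replicate n.toNat [])) idx [] = pvF n arr idx := by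
  show PySem.List.pyGetD ((PySem.List.pyRange 0 n 1).foldl (pvStepA n arr)
      (List.replicate n.toNat [])) idx [] = pvF n arr idx
  have hcast : ((idx.toNat : Nat) : Int) = idx := Int.toNat_of_nonneg h0
  have hr : idx ∈ PySem.List.pyRange 0 n 1 := by
    rw [PySem.List.mem_pyRange_one]; omega
  have h := pvOuter (pvF n arr) (pvStepA n arr) (PySem.List.pyRange 0 n 1)
    (List.replicate n.toNat [])
    (fun mv' i _ hi0 hil => pvStepA_eq n arr mv' i hi0 hil)
    (PySem.List.nodup_pyRange_one 0 n)
    (fun j hj => by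
      have hjr := (PySem.List.mem_pyRange_one).1 hj
      refine ⟨by omega, ?_⟩
      simp only [List.length_replicate]
      omega)
    idx h0
  rw [← hcast, PySem.List.pyGetD_natCast, h, if_pos hr]
  simp [List.getD_eq_getElem?_getD, hcast, show idx.toNat < n.toNat by omega]

lemma pvMatchIf {α : Type} (o : Option Int) (X Y : α) :
    (match o with | some _ => X | none => Y) = if o.isSome then X else Y := by
  cases o <;> simp

-- ---------- A-side: the dp fold computes pvWinSpec ----------

-- body of A's dp loop, with the moves list already characterised
def pvStepDP (n : Int) (arr : List Int) (dp : List Char) (idx : Int) : List Char :=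
  match (pvF n arr idx).find? (fun m => PySem.List.pyGetD dp m 'B' == 'B') with
  | some _ => PySem.List.pySetD dp idx 'A'
  | none => dp

lemma pvAfold (n : Int) (arr : List Int) :
    ∀ (l : List Int) (dp : List Char),
    dp.length = n.toNat → l.Nodup →
    (∀ idx ∈ l, 0 ≤ idx ∧ idx < n) →
    l.Pairwise (fun a b => -(PySem.List.pyGetD arr a 0) ≤ -(PySem.List.pyGetD arr b 0)) →
    (∀ k : Nat, k < n.toNat →
      dp.getD k 'B' = (if (k : Int) ∉ l ∧ pvWinSpec n arr k = true then 'A' else 'B')) →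
    (l.foldl (pvStepDP n arr) dp).length = n.toNat ∧
    ∀ k : Nat, k < n.toNat →
      (l.foldl (pvStepDP n arr) dp).getD k 'B' =
        (if pvWinSpec n arr k = true then 'A' else 'B') := by
  intro l
  induction l with
  | nil =>
    intro dp hlen _ _ _ hinv
    refine ⟨by simpa using hlen, fun k hk => by simpa using hinv k hk⟩
  | cons idx l' ih =>
    intro dp hlen hnd hb hpw hinv
    obtain ⟨hidx0, hidxn⟩ := hb idx (by simp)
    have hcast : ((idx.toNat : Nat) : Int) = idx := Int.toNat_of_nonneg hidx0
    have hFb : ∀ m ∈ pvF n arr idx, 0 ≤ m ∧ m < n := by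
      intro m hm
      exact pvCands_bounds n arr idx hidx0 hidxn m (List.mem_filter.1 hm).1
    have hFgt : ∀ m ∈ pvF n arr idx,
        PySem.List.pyGetD arr idx 0 < PySem.List.pyGetD arr m 0 := by
      intro m hm
      have h := (List.mem_filter.1 hm).2
      simp only [pvGt, decide_eq_true_eq] at h
      omega
    have hnotin : ∀ m ∈ pvF n arr idx, m ∉ (idx :: l') := by
      intro m hm hmem
      rcases List.mem_cons.1 hmem with h | h
      · have := hFgt m hm; rw [h] at this; omega
      · have hrel := (List.pairwise_cons.1 hpw).1 m h
        have := hFgt m hm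
        omega
    have hpred : ∀ m ∈ pvF n arr idx,
        (PySem.List.pyGetD dp m 'B' == 'B') = !pvWinSpec n arr m := by
      intro m hm
      obtain ⟨hm0, hmn⟩ := hFb m hm
      have hmc : ((m.toNat : Nat) : Int) = m := Int.toNat_of_nonneg hm0
      have hkn : m.toNat < n.toNat := by omega
      have hv := hinv m.toNat hkn
      rw [hmc] at hv
      rw [← hmc, PySem.List.pyGetD_natCast, hv]
      by_cases hw : pvWinSpec n arr m = true
      · rw [if_pos ⟨hnotin m hm, hw⟩, hmc, hw]
        decide
      · rw [if_neg (fun hc => hw hc.2)]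
        have hw' : pvWinSpec n arr m = false := Bool.eq_false_iff.2 hw
        rw [hmc, hw']
        decide
    have hfind : ((pvF n arr idx).find? (fun m => PySem.List.pyGetD dp m 'B' == 'B')).isSome
        = pvWinSpec n arr idx := by
      rw [Bool.eq_iff_iff, List.find?_isSome, pvWinSpec_eq n arr idx hidx0 hidxn,
        List.any_eq_true]
      constructor
      · rintro ⟨m, hm, h⟩; exact ⟨m, hm, by rw [← hpred m hm]; exact h⟩
      · rintro ⟨m, hm, h⟩; exact ⟨m, hm, by rw [hpred m hm]; exact h⟩
    have hstep : pvStepDP n arr dp idx =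
        if pvWinSpec n arr idx = true then dp.set idx.toNat 'A' else dp := by
      unfold pvStepDP
      rw [pvMatchIf, hfind,
        show PySem.List.pySetD dp idx 'A' = dp.set idx.toNat 'A' from by
          rw [← hcast, PySem.List.pySetD_natCast, Int.toNat_natCast]]
    rw [List.foldl_cons]
    apply ih
    · rw [hstep]
      split
      · simp [hlen]
      · exact hlen
    · exact hnd.of_cons
    · exact fun j hj => hb j (by simp [hj])
    · exact (List.pairwise_cons.1 hpw).2
    · intro k hk
      rw [hstep]
      by_cases hki : (k : Int) = idx
      · have hkn : k = idx.toNat := by omega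
        by_cases hw : pvWinSpec n arr idx = true
        · rw [if_pos hw, hkn, pvGetDSet _ _ _ _ (by rw [hlen]; omega), hcast,
            if_pos ⟨(List.nodup_cons.1 hnd).1, hw⟩]
        · rw [if_neg hw, hinv k hk,
            if_neg (by rintro ⟨h1, _⟩; exact h1 (by simp [hki])),
            if_neg (by rintro ⟨_, h2⟩; rw [hki] at h2; exact hw h2)]
      · have hkn : k ≠ idx.toNat := by omega
        have hunch : (if pvWinSpec n arr idx = true then dp.set idx.toNat 'A' else dp).getD k 'B'
            = dp.getD k 'B' := by
          split
          · exact pvGetDSetNe _ _ _ _ _ (Ne.symm hkn)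
          · rfl
        rw [hunch, hinv k hk]
        by_cases hm : (k : Int) ∈ l' <;> by_cases hw : pvWinSpec n arr (k : Int) = true <;>
          simp [hm, hw, hki]

-- A's port equals the spec string
lemma pvA_eq_spec (n : Int) (arr : List Int) :
    compute_s_optimized n arr =
      String.ofList ((PySem.List.pyRange 0 n 1).map
        (fun i => if pvWinSpec n arr i = true then 'A' else 'B')) := by
  simp only [compute_s_optimized]
  have hS : ∀ idx ∈ PySem.List.sorted (PySem.List.pyRange 0 n 1)
      (fun x => -(PySem.List.pyGetD arr x 0)) false, 0 ≤ idx ∧ idx < n := by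
    intro idx hidx
    have h1 := (PySem.List.mem_sorted _ _ _ _).1 hidx
    have h2 := (PySem.List.mem_pyRange_one).1 h1
    omega
  refine Eq.trans (b := String.ofList
      ((PySem.List.sorted (PySem.List.pyRange 0 n 1)
        (fun x => -(PySem.List.pyGetD arr x 0)) false).foldl (pvStepDP n arr)
        (List.replicate n.toNat 'B'))) ?_ ?_
  · apply congrArg String.ofList
    apply PySem.List.foldl_congr_mem
    intro dp idx hidx
    obtain ⟨h0, hn⟩ := hS idx hidx
    rw [pvMoves n arr idx h0 hn]
    rfl
  · obtain ⟨hlenF, hgetF⟩ := pvAfold n arr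
      (PySem.List.sorted (PySem.List.pyRange 0 n 1)
        (fun x => -(PySem.List.pyGetD arr x 0)) false)
      (List.replicate n.toNat 'B')
      (by simp)
      ((PySem.List.sorted_perm _ _ _).nodup_iff.2 (PySem.List.nodup_pyRange_one 0 n))
      hS
      (PySem.List.sorted_pairwise _ _)
      (by
        intro k hk
        have hmem : (k : Int) ∈ PySem.List.sorted (PySem.List.pyRange 0 n 1)
            (fun x => -(PySem.List.pyGetD arr x 0)) false := by
          rw [PySem.List.mem_sorted, PySem.List.mem_pyRange_one]
          omega
        rw [if_neg (fun hc => hc.1 hmem)]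
        simp [List.getD_eq_getElem?_getD, hk])
    apply congrArg String.ofList
    apply List.ext_getElem
    · rw [hlenF, List.length_map, PySem.List.length_pyRange_one]
      omega
    · intro k h1 h2
      have hk : k < n.toNat := by rw [hlenF] at h1; exact h1
      have hg := hgetF k hk
      rw [List.getD_eq_getElem _ 'B' h1] at hg
      rw [hg, List.getElem_map, PySem.List.getElem_pyRange_one]
      simp

-- ---------- B-side: the memoized search computes pvWinSpec ----------

def pvMemoInv (n : Int) (arr : List Int) (memo : PySem.Dict Int Bool) : Prop :=
  ∀ k b, PySem.Dict.get? memo k = some b → b = pvWinSpec n arr k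

lemma pvList_correct (n : Int) (arr : List Int) (f : Nat)
    (IH : ∀ (i : Int) (memo : PySem.Dict Int Bool),
      pvMemoInv n arr memo → 0 ≤ i → i < n → pvRank n arr i < f →
      (pvWinGo n arr f i memo).1 = pvWinSpec n arr i ∧
        pvMemoInv n arr (pvWinGo n arr f i memo).2) :
    ∀ (ai : Int) (cl : List Int) (memo : PySem.Dict Int Bool), pvMemoInv n arr memo →
    (∀ j ∈ cl, PySem.List.pyGetD arr j 0 > ai → 0 ≤ j ∧ j < n ∧ pvRank n arr j < f) →
    (pvWinList n arr f ai cl memo).1 =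
      cl.any (fun j => pvGt arr ai j && !pvWinSpec n arr j) ∧
      pvMemoInv n arr (pvWinList n arr f ai cl memo).2 := by
  intro ai cl
  induction cl with
  | nil =>
    intro memo hInv _
    rw [pvWinList]
    exact ⟨by simp, hInv⟩
  | cons j rest ih =>
    intro memo hInv hgood
    rw [pvWinList]
    by_cases hj : PySem.List.pyGetD arr j 0 > ai
    · obtain ⟨h0, hn, hr⟩ := hgood j (by simp) hj
      have hGo := IH j memo hInv h0 hn hr
      rw [if_pos hj]
      simp only []
      by_cases hp : (pvWinGo n arr f j memo).1 = true
      · rw [if_pos hp]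
        have hrest := ih (pvWinGo n arr f j memo).2 hGo.2
          (fun j' hj' hgt => hgood j' (by simp [hj']) hgt)
        refine ⟨?_, hrest.2⟩
        rw [hrest.1, List.any_cons]
        have hw : pvWinSpec n arr j = true := by rw [← hGo.1]; exact hp
        simp [pvGt, hj, hw]
      · rw [if_neg hp]
        refine ⟨?_, hGo.2⟩
        have hw : pvWinSpec n arr j = false := by
          rw [← hGo.1]; exact Bool.eq_false_iff.2 hp
        simp [pvGt, hj, hw]
    · rw [if_neg hj]
      have hrest := ih memo hInv (fun j' hj' hgt => hgood j' (by simp [hj']) hgt)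
      refine ⟨?_, hrest.2⟩
      rw [hrest.1, List.any_cons]
      simp [pvGt, hj]

lemma pvGo_correct (n : Int) (arr : List Int) :
    ∀ (fuel : Nat) (i : Int) (memo : PySem.Dict Int Bool),
    pvMemoInv n arr memo → 0 ≤ i → i < n → pvRank n arr i < fuel →
    (pvWinGo n arr fuel i memo).1 = pvWinSpec n arr i ∧
      pvMemoInv n arr (pvWinGo n arr fuel i memo).2 := by
  intro fuel
  induction fuel with
  | zero => intro i memo _ _ _ hr; omega
  | succ f ih =>
    intro i memo hInv h0 hn hr
    rw [pvWinGo]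
    cases hm : PySem.Dict.get? memo i with
    | some b =>
      simp only []
      exact ⟨(hInv i b hm), hInv⟩
    | none =>
      simp only []
      have hgood : ∀ j ∈ pvCands n arr i, PySem.List.pyGetD arr j 0 > PySem.List.pyGetD arr i 0 →
          0 ≤ j ∧ j < n ∧ pvRank n arr j < f := by
        intro j hj hgt
        obtain ⟨hj0, hjn⟩ := pvCands_bounds n arr i h0 hn j hj
        exact ⟨hj0, hjn, by have := pvRank_lt n arr i j hj0 hjn hgt; omega⟩
      have hlist := pvList_correct n arr f ih (PySem.List.pyGetD arr i 0) (pvCands n arr i)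
        memo hInv hgood
      have hval : (pvWinList n arr f (PySem.List.pyGetD arr i 0) (pvCands n arr i) memo).1 =
          pvWinSpec n arr i := by
        rw [hlist.1, pvWinSpec_eq n arr i h0 hn, pvF, List.any_filter]
      refine ⟨hval, ?_⟩
      intro k b hk
      rw [PySem.Dict.get?_insert] at hk
      by_cases hki : k = i
      · rw [if_pos hki] at hk
        cases hk
        rw [hval, hki]
      · rw [if_neg hki] at hk
        exact hlist.2 k b hk

lemma pvRank_lt_n (n : Int) (arr : List Int) (i : Int) (h0 : 0 ≤ i) (hn : i < n) :
    pvRank n arr i < n.toNat := by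
  unfold pvRank
  have : ((PySem.List.pyRange 0 n 1).filter
      (fun k => decide (PySem.List.pyGetD arr k 0 > PySem.List.pyGetD arr i 0))).length <
      (PySem.List.pyRange 0 n 1).length := by
    rw [List.length_filter_lt_length_iff_exists]
    refine ⟨i, ?_, by simp⟩
    rw [PySem.List.mem_pyRange_one]; omega
  have hlen : (PySem.List.pyRange 0 n 1).length = n.toNat := by
    rw [PySem.List.length_pyRange_one]; omega
  omega

lemma pvBfold (n : Int) (arr : List Int) :
    ∀ (l : List Int) (acc : List Char) (memo : PySem.Dict Int Bool),
    pvMemoInv n arr memo →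
    (∀ i ∈ l, 0 ≤ i ∧ i < n) →
    (l.foldl (fun acc i =>
      let p := pvWinGo n arr n.toNat i acc.2
      (acc.1 ++ [if p.1 then 'A' else 'B'], p.2)) (acc, memo)).1 =
      acc ++ l.map (fun i => if pvWinSpec n arr i = true then 'A' else 'B') := by
  intro l
  induction l with
  | nil => intro acc memo _ _; simp
  | cons i rest ih =>
    intro acc memo hInv hb
    obtain ⟨h0, hn⟩ := hb i (by simp)
    have hGo := pvGo_correct n arr n.toNat i memo hInv h0 hn (pvRank_lt_n n arr i h0 hn)
    rw [List.foldl_cons]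
    simp only []
    rw [ih (acc ++ [if (pvWinGo n arr n.toNat i memo).1 then 'A' else 'B'])
      (pvWinGo n arr n.toNat i memo).2 hGo.2 (fun j hj => hb j (by simp [hj]))]
    rw [hGo.1, List.map_cons, List.append_assoc, List.singleton_append]

lemma pvB_eq_spec (n : Int) (arr : List Int) :
    compute_s_optimized_alt n arr =
      String.ofList ((PySem.List.pyRange 0 n 1).map
        (fun i => if pvWinSpec n arr i = true then 'A' else 'B')) := by
  unfold compute_s_optimized_alt
  have := pvBfold n arr (PySem.List.pyRange 0 n 1) [] PySem.Dict.empty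
    (by intro k b hk; simp [PySem.Dict.get?_empty] at hk)
    (by intro i hi; have := (PySem.List.mem_pyRange_one).1 hi; omega)
  exact congrArg String.ofList (by simpa using this)

-- ===== VERDICT (by name: the statement is the Claim_ definition above) =====
theorem compute_s_optimized_spec : Claim_equal_compute_s_optimized := by
  intro n arr _ _
  unfold Spec_compute_s_optimized
  rw [pvA_eq_spec, pvB_eq_spec]
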